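-- pv_equiv track=rewrite | github.com/PoonLab/MiCall-Lite | micall/core/sam2aln.py | merge_pairs
-- ===== SOURCE A (Python) =====
-- def merge_pairs(seq1,
--                 seq2,
--                 qual1,
--                 qual2,
--                 ins1=None,
--                 ins2=None,
--                 q_cutoff=10,
--                 minimum_q_delta=5):
--     """
--     Combine paired-end reads into a single sequence.
--
--     Manage discordant base calls on the basis of quality scores, and add any
--     insertions.
--     @param seq1: a read sequence of base calls in a string
--     @param seq2: a read sequence of base calls in a string, aligned with seq1
--     @param qual1: a string of quality scores for the base calls in seq1, each
--         quality score is an ASCII character of the Phred-scaled base quality+33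
--     @param qual2: a string of quality scores for the base calls in seq2
--     @param ins1: { pos: (seq, qual) } a dictionary of insertions to seq1 with
--         the zero-based position that follows each insertion as the
--         key, and the insertion sequence and quality strings as the
--         value. May also be None.
--     @param ins2: the same as ins1, but for seq2
--     @param q_cutoff: Phred-scaled base quality as an integer - each base quality
--         score must be higher than this, or the base will be reported as an N.
--     @param minimum_q_delta: if the two reads disagree on a base, the higher
--         quality must be at least this much higher than the other, or that base
--         will be reported as an N.
--     @return: the merged sequence of base calls in a string
--     """
--     mseq = ''
--     # force second read to be longest of the two
--     if len(seq1) > len(seq2):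
--         seq1, seq2 = seq2, seq1
--         qual1, qual2 = qual2, qual1
--
--     for i, c2 in enumerate(seq2):
--         q2 = ord(qual2[i])-33
--         if i < len(seq1):
--             c1 = seq1[i]
--             q1 = ord(qual1[i])-33
--             if c1 == '-' and c2 == '-':
--                 mseq += '-'
--                 continue
--             if c1 == c2:  # Reads agree and at least one has sufficient confidence
--                 if q1 > q_cutoff or q2 > q_cutoff:
--                     mseq += c1
--                 else:
--                     mseq += 'N'  # neither base is confident
--             else:
--                 if abs(q2 - q1) >= minimum_q_delta:
--                     if q1 > max(q2, q_cutoff):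
--                         mseq += c1
--                     elif q2 > max(q1, q_cutoff):
--                         mseq += c2
--                     else:
--                         mseq += 'N'
--                 else:
--                     mseq += 'N'  # cannot resolve between discordant bases
--         else:
--             # past end of read 1
--             if c2 == '-' and q2 == 0:
--                 mseq += 'n'  # interval between reads
--             elif q2 > q_cutoff:
--                 mseq += c2
--             else:
--                 mseq += 'N'
--
--     ins1 = {} if ins1 is None else ins1
--     ins2 = {} if ins2 is None else ins2
--     for pos in range(len(mseq)-1, -1, -1):
--         ins_seq1, ins_qual1 = ins1.get(pos, ('', ''))
--         ins_seq2, ins_qual2 = ins2.get(pos, ('', ''))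
--         if ins_seq1 or ins_seq2:
--             ins_mseq = merge_pairs(ins_seq1, ins_seq2, ins_qual1, ins_qual2)
--             mseq = mseq[:pos] + ins_mseq + mseq[pos:]
--     return mseq
-- ===== SOURCE B (Python) =====
-- def _merged_base(seq1, seq2, qual1, qual2, i, q_cutoff, minimum_q_delta):
--     c2 = seq2[i]
--     q2 = ord(qual2[i]) - 33
--     if i >= len(seq1):
--         if c2 == '-' and q2 == 0:
--             return 'n'
--         return c2 if q2 > q_cutoff else 'N'
--     c1 = seq1[i]
--     q1 = ord(qual1[i]) - 33
--     if c1 == '-' and c2 == '-':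
--         return '-'
--     if c1 == c2:
--         return c1 if max(q1, q2) > q_cutoff else 'N'
--     if abs(q2 - q1) >= minimum_q_delta:
--         if q1 > max(q2, q_cutoff):
--             return c1
--         if q2 > max(q1, q_cutoff):
--             return c2
--     return 'N'
--
--
-- def merge_pairs(seq1,
--                 seq2,
--                 qual1,
--                 qual2,
--                 ins1=None,
--                 ins2=None,
--                 q_cutoff=10,
--                 minimum_q_delta=5):
--     """Single forward pass: emit each position's insertion (if any) then its merged base."""
--     if len(seq1) > len(seq2):
--         seq1, seq2 = seq2, seq1
--         qual1, qual2 = qual2, qual1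
--     d1 = ins1 or {}
--     d2 = ins2 or {}
--     pieces = []
--     for i in range(len(seq2)):
--         s1, t1 = d1.get(i, ('', ''))
--         s2, t2 = d2.get(i, ('', ''))
--         if s1 or s2:
--             pieces.append(merge_pairs(s1, s2, t1, t2))
--         pieces.append(_merged_base(seq1, seq2, qual1, qual2, i, q_cutoff, minimum_q_delta))
--     return ''.join(pieces)
-- ===== Notes on version B (the rewrite author's own statement) =====
-- stated objective: faster
-- what changed: B fuses A's two phases (build mseq base-by-base, then a reverse-order insertion pass of quadratic string splicing mseq[:pos]+ins+mseq[pos:]) into one forward pass that per position appends the merged insertion (if any) and then the merged base to a piece list joined once at the end.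
import Mathlib
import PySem

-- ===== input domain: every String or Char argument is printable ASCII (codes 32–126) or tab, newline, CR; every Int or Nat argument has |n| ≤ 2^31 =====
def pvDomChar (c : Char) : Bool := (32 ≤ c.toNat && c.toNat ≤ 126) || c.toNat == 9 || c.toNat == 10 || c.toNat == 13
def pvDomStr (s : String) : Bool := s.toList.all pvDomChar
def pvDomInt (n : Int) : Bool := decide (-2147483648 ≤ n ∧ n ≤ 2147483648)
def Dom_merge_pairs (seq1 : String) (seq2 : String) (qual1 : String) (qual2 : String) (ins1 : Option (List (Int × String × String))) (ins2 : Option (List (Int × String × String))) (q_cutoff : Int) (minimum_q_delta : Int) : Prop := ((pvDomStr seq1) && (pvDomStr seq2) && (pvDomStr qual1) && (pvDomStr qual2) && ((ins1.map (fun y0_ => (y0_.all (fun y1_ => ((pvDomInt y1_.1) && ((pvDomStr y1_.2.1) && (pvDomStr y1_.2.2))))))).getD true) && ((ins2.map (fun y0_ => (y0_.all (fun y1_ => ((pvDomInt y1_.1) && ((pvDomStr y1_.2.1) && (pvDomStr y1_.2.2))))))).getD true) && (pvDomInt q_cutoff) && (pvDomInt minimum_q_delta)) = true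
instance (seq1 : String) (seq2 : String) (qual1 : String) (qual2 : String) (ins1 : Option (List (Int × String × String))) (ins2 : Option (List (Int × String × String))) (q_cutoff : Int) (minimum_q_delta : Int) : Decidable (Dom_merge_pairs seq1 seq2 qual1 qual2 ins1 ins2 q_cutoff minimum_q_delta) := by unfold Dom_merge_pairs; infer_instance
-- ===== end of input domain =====

-- B is a single forward pass accumulating pieces (insertion-then-base) joined at the end,
-- instead of A's two phases (build mseq, then reverse-order splicing); return values proved equal.

-- ===== PORT A =====
-- ins.get(pos, ('','')) on the insertion dict (assoc list, first match)
def lookupInsA : List (Int × String × String) → Int → String × String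
  | [], _ => ("", "")
  | (k, s, q) :: t, pos => if k = pos then (s, q) else lookupInsA t pos

-- the 'for i, c2 in enumerate(seq2)' loop of A, building mseq (as List Char)
def phase1A (s1 s2 q1 q2 : List Char) (qc md : Int) : List Char :=
  (PySem.List.enumerate s2).foldl (fun mseq ic =>
    let i := ic.1
    let c2 := ic.2
    let q2i : Int := ((PySem.List.pyGetD q2 i ' ').toNat : Int) - 33
    if i < (s1.length : Int) then
      let c1 := PySem.List.pyGetD s1 i ' '
      let q1i : Int := ((PySem.List.pyGetD q1 i ' ').toNat : Int) - 33
      if c1 = '-' ∧ c2 = '-' then mseq ++ ['-']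
      else if c1 = c2 then
        (if q1i > qc ∨ q2i > qc then mseq ++ [c1] else mseq ++ ['N'])
      else if |q2i - q1i| ≥ md then
        (if q1i > max q2i qc then mseq ++ [c1]
         else if q2i > max q1i qc then mseq ++ [c2]
         else mseq ++ ['N'])
      else mseq ++ ['N']
    else
      if c2 = '-' ∧ q2i = 0 then mseq ++ ['n']
      else if q2i > qc then mseq ++ [c2]
      else mseq ++ ['N']) []

-- the recursive call merge_pairs(s1, s2, t1, t2): ins1 = ins2 = None and default cutoffs,
-- so its insertion loop looks everything up in {} and never splices (kept as the literal no-op loop)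
def mergeInnerA (s1 s2 t1 t2 : String) : String :=
  let p := if s1.toList.length > s2.toList.length
           then (s2.toList, s1.toList, t2.toList, t1.toList)
           else (s1.toList, s2.toList, t1.toList, t2.toList)
  let m := phase1A p.1 p.2.1 p.2.2.1 p.2.2.2 10 5
  String.ofList ((PySem.List.pyRange ((m.length : Int) - 1) (-1) (-1)).foldl (fun ms _pos => ms) m)

def merge_pairs (seq1 : String) (seq2 : String) (qual1 : String) (qual2 : String) (ins1 : Option (List (Int × String × String))) (ins2 : Option (List (Int × String × String))) (q_cutoff : Int) (minimum_q_delta : Int) : String :=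
  -- force second read to be longest of the two
  let p := if seq1.toList.length > seq2.toList.length
           then (seq2, seq1, qual2, qual1)
           else (seq1, seq2, qual1, qual2)
  let m0 := phase1A p.1.toList p.2.1.toList p.2.2.1.toList p.2.2.2.toList q_cutoff minimum_q_delta
  let d1 := ins1.getD []     -- ins1 = {} if ins1 is None else ins1
  let d2 := ins2.getD []
  -- for pos in range(len(mseq)-1, -1, -1): splice insertions back to front
  String.ofList ((PySem.List.pyRange ((m0.length : Int) - 1) (-1) (-1)).foldl (fun m pos =>
    let r1 := lookupInsA d1 pos
    let r2 := lookupInsA d2 pos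
    if r1.1 ≠ "" ∨ r2.1 ≠ "" then
      PySem.List.slice m none (some pos) ++ (mergeInnerA r1.1 r2.1 r1.2 r2.2).toList
        ++ PySem.List.slice m (some pos) none
    else m) m0)

-- ===== PORT B =====
-- (ins or {}).get(i, ('','')) in B
def getInsB (d : Option (List (Int × String × String))) (pos : Int) : String × String :=
  match d with
  | none => ("", "")
  | some l => goB l pos
where goB : List (Int × String × String) → Int → String × String
  | [], _ => ("", "")
  | (k, s, q) :: t, pos => if k = pos then (s, q) else goB t pos

-- B's helper _merged_base: the per-position decision, early-return style
def mergedBaseB (s1 s2 q1 q2 : List Char) (i : Nat) (qc md : Int) : Char :=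
  let c2 := s2.getD i ' '
  let q2i : Int := ((q2.getD i ' ').toNat : Int) - 33
  if s1.length ≤ i then
    if c2 = '-' ∧ q2i = 0 then 'n'
    else if q2i > qc then c2 else 'N'
  else
    let c1 := s1.getD i ' '
    let q1i : Int := ((q1.getD i ' ').toNat : Int) - 33
    if c1 = '-' ∧ c2 = '-' then '-'
    else if c1 = c2 then (if qc < max q1i q2i then c1 else 'N')
    else if |q2i - q1i| ≥ md then
      (if q1i > max q2i qc then c1
       else if q2i > max q1i qc then c2
       else 'N')
    else 'N'

-- B's recursive call merge_pairs(s1, s2, t1, t2): ins None, default cutoffs — every get returns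
-- ('',''), so the loop emits only the merged bases
def innerB (s1 s2 t1 t2 : String) : String :=
  let p := if s1.toList.length > s2.toList.length
           then (s2.toList, s1.toList, t2.toList, t1.toList)
           else (s1.toList, s2.toList, t1.toList, t2.toList)
  String.ofList ((List.range p.2.1.length).foldl (fun pieces i =>
    pieces ++ [mergedBaseB p.1 p.2.1 p.2.2.1 p.2.2.2 i 10 5]) [])

def merge_pairs_alt (seq1 : String) (seq2 : String) (qual1 : String) (qual2 : String) (ins1 : Option (List (Int × String × String))) (ins2 : Option (List (Int × String × String))) (q_cutoff : Int) (minimum_q_delta : Int) : String :=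
  let p := if seq1.toList.length > seq2.toList.length
           then (seq2, seq1, qual2, qual1)
           else (seq1, seq2, qual1, qual2)
  let s1 := p.1.toList
  let s2 := p.2.1.toList
  let q1 := p.2.2.1.toList
  let q2 := p.2.2.2.toList
  -- single forward pass: per position, first the merged insertion (if any), then the merged base
  String.ofList ((List.range s2.length).foldl (fun pieces i =>
    let r1 := getInsB ins1 (Int.ofNat i)
    let r2 := getInsB ins2 (Int.ofNat i)
    (if r1.1 ≠ "" ∨ r2.1 ≠ "" then pieces ++ (innerB r1.1 r2.1 r1.2 r2.2).toList else pieces)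
      ++ [mergedBaseB s1 s2 q1 q2 i q_cutoff minimum_q_delta]) [])

-- ===== PRECONDITION & SPEC =====
-- first-match lookup used only to state Pre_ (Python's ins.get on the assoc-list model)
def preLookup (d : Option (List (Int × String × String))) (pos : Int) : String × String :=
  match d with
  | none => ("", "")
  | some l => goP l pos
where goP : List (Int × String × String) → Int → String × String
  | [], _ => ("", "")
  | (k, s, q) :: t, pos => if k = pos then (s, q) else goP t pos

-- Pre_ excludes exactly the inputs on which Python A raises IndexError: a quality string shorter
-- than its read, or a triggered insertion whose quality string is shorter than its sequence.
def Pre_merge_pairs (seq1 : String) (seq2 : String) (qual1 : String) (qual2 : String) (ins1 : Option (List (Int × String × String))) (ins2 : Option (List (Int × String × String))) (q_cutoff : Int) (minimum_q_delta : Int) : Prop :=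
  seq1.toList.length ≤ qual1.toList.length ∧
  seq2.toList.length ≤ qual2.toList.length ∧
  ∀ k ∈ List.range (max seq1.toList.length seq2.toList.length),
    (preLookup ins1 (k : Int)).1 ≠ "" ∨ (preLookup ins2 (k : Int)).1 ≠ "" →
      (preLookup ins1 (k : Int)).1.toList.length ≤ (preLookup ins1 (k : Int)).2.toList.length ∧
      (preLookup ins2 (k : Int)).1.toList.length ≤ (preLookup ins2 (k : Int)).2.toList.length

instance (seq1 : String) (seq2 : String) (qual1 : String) (qual2 : String) (ins1 : Option (List (Int × String × String))) (ins2 : Option (List (Int × String × String))) (q_cutoff : Int) (minimum_q_delta : Int) : Decidable (Pre_merge_pairs seq1 seq2 qual1 qual2 ins1 ins2 q_cutoff minimum_q_delta) := by unfold Pre_merge_pairs; infer_instance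

def pvWitness_merge_pairs : String × String × String × String × (Option (List (Int × String × String))) × (Option (List (Int × String × String))) × Int × Int :=
  ("AC", "ACG", "II", "II5", some [((1 : Int), "T", "I")], none, 10, 5)

def Spec_merge_pairs (seq1 : String) (seq2 : String) (qual1 : String) (qual2 : String) (ins1 : Option (List (Int × String × String))) (ins2 : Option (List (Int × String × String))) (q_cutoff : Int) (minimum_q_delta : Int) (out : String) : Prop := out = merge_pairs_alt seq1 seq2 qual1 qual2 ins1 ins2 q_cutoff minimum_q_delta
instance (seq1 : String) (seq2 : String) (qual1 : String) (qual2 : String) (ins1 : Option (List (Int × String × String))) (ins2 : Option (List (Int × String × String))) (q_cutoff : Int) (minimum_q_delta : Int) (out : String) : Decidable (Spec_merge_pairs seq1 seq2 qual1 qual2 ins1 ins2 q_cutoff minimum_q_delta out) := by unfold Spec_merge_pairs; infer_instance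

-- ===== CLAIM (what is proved, stated in full; the proofs are below) =====
def Claim_equal_merge_pairs : Prop := ∀ (seq1 : String) (seq2 : String) (qual1 : String) (qual2 : String) (ins1 : Option (List (Int × String × String))) (ins2 : Option (List (Int × String × String))) (q_cutoff : Int) (minimum_q_delta : Int), Dom_merge_pairs seq1 seq2 qual1 qual2 ins1 ins2 q_cutoff minimum_q_delta → Pre_merge_pairs seq1 seq2 qual1 qual2 ins1 ins2 q_cutoff minimum_q_delta → Spec_merge_pairs seq1 seq2 qual1 qual2 ins1 ins2 q_cutoff minimum_q_delta (merge_pairs seq1 seq2 qual1 qual2 ins1 ins2 q_cutoff minimum_q_delta)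

-- ===== LEMMAS AND PROOFS =====
-- the two assoc-list lookups agree
theorem lookupInsA_eq_getInsB (o : Option (List (Int × String × String))) (pos : Int) :
    lookupInsA (o.getD []) pos = getInsB o pos := by
  cases o with
  | none => rfl
  | some l =>
    show lookupInsA l pos = getInsB.goB l pos
    induction l with
    | nil => rfl
    | cons hd t ih =>
      obtain ⟨k, sq, q⟩ := hd
      simp only [lookupInsA, getInsB.goB, ih]


-- A's phase-1 append char, as a function (used only in the proofs)
def chA (s1 q1 q2 : List Char) (qc md : Int) (i : Int) (c2 : Char) : Char :=
  let q2i : Int := ((PySem.List.pyGetD q2 i ' ').toNat : Int) - 33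
  if i < (s1.length : Int) then
    let c1 := PySem.List.pyGetD s1 i ' '
    let q1i : Int := ((PySem.List.pyGetD q1 i ' ').toNat : Int) - 33
    if c1 = '-' ∧ c2 = '-' then '-'
    else if c1 = c2 then (if q1i > qc ∨ q2i > qc then c1 else 'N')
    else if |q2i - q1i| ≥ md then
      (if q1i > max q2i qc then c1
       else if q2i > max q1i qc then c2
       else 'N')
    else 'N'
  else
    if c2 = '-' ∧ q2i = 0 then 'n'
    else if q2i > qc then c2
    else 'N'

theorem charA_eq_mergedBaseB (s1 s2 q1 q2 : List Char) (qc md : Int) :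
    phase1A s1 s2 q1 q2 qc md =
      (List.range s2.length).map (fun j => mergedBaseB s1 s2 q1 q2 j qc md) := by
  have hbody : (fun (mseq : List Char) (ic : Int × Char) =>
      let i := ic.1
      let c2 := ic.2
      let q2i : Int := ((PySem.List.pyGetD q2 i ' ').toNat : Int) - 33
      if i < (s1.length : Int) then
        let c1 := PySem.List.pyGetD s1 i ' '
        let q1i : Int := ((PySem.List.pyGetD q1 i ' ').toNat : Int) - 33
        if c1 = '-' ∧ c2 = '-' then mseq ++ ['-']
        else if c1 = c2 then
          (if q1i > qc ∨ q2i > qc then mseq ++ [c1] else mseq ++ ['N'])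
        else if |q2i - q1i| ≥ md then
          (if q1i > max q2i qc then mseq ++ [c1]
           else if q2i > max q1i qc then mseq ++ [c2]
           else mseq ++ ['N'])
        else mseq ++ ['N']
      else
        if c2 = '-' ∧ q2i = 0 then mseq ++ ['n']
        else if q2i > qc then mseq ++ [c2]
        else mseq ++ ['N'])
      = fun mseq ic => mseq ++ [chA s1 q1 q2 qc md ic.1 ic.2] := by
    funext mseq ic
    simp only [chA]
    split_ifs <;> rfl
  rw [phase1A, hbody, PySem.List.foldl_append_singleton_eq_map, List.nil_append,
      PySem.List.enumerate_eq_map_pyRange s2 ' ', PySem.List.len_eq,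
      PySem.List.pyRange_zero_natCast, List.map_map, List.map_map]
  refine List.map_congr_left ?_
  intro k hk
  rw [List.mem_range] at hk
  simp only [Function.comp, chA, mergedBaseB, PySem.List.pyGetD_natCast]
  by_cases h : s2.length ≤ k
  · omega
  · by_cases h1 : s1.length ≤ k
    · rw [if_neg (by omega), if_pos h1]
    · rw [if_pos (by omega), if_neg h1]
      simp only [lt_max_iff]

theorem splice_desc (g : Int → List Char) :
    ∀ (c t : List Char),
      (PySem.List.pyRange ((c.length : Int) - 1) (-1) (-1)).foldl
        (fun m pos => m.take pos.toNat ++ g pos ++ m.drop pos.toNat) (c ++ t)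
      = (List.range c.length).flatMap (fun j => g (Int.ofNat j) ++ [c.getD j ' ']) ++ t := by
  intro c
  induction c using List.reverseRecOn with
  | nil => intro t; rw [PySem.List.pyRange_neg_one_eq_nil (by simp)]; simp
  | append_singleton c b ih =>
    intro t
    have hlen : ((c ++ [b]).length : Int) - 1 = (c.length : Int) := by
      simp [List.length_append]
    rw [hlen, PySem.List.pyRange_neg_one_cons (by omega)]
    simp only [List.foldl_cons]
    have htoNat : ((c.length : Nat) : Int).toNat = c.length := by omega
    rw [htoNat]
    have h1 : List.take c.length (c ++ [b] ++ t) = c := by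
      rw [List.append_assoc, List.take_append_of_le_length (by omega), List.take_length]
    have h2 : List.drop c.length (c ++ [b] ++ t) = [b] ++ t := by
      rw [List.append_assoc, List.drop_append_of_le_length (by omega), List.drop_length]; simp
    rw [h1, h2]
    have hc : c ++ g (c.length : Int) ++ ([b] ++ t) = c ++ ((g (c.length : Int) ++ [b]) ++ t) := by
      simp [List.append_assoc]
    rw [hc, ih (g (c.length : Int) ++ [b] ++ t)]
    have hrs : (c ++ [b]).length = c.length + 1 := by simp
    rw [hrs, List.range_succ, List.flatMap_append]
    have hgd : ∀ j ∈ List.range c.length,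
        g (Int.ofNat j) ++ [(c ++ [b]).getD j ' '] = g (Int.ofNat j) ++ [c.getD j ' '] := by
      intro j hj
      rw [List.mem_range] at hj
      rw [List.getD_append _ _ _ _ hj]
    rw [List.flatMap_def, List.flatMap_def, List.map_congr_left hgd]
    simp [List.append_assoc]

-- A's recursive insertion merge equals B's
theorem mergeInnerA_eq_innerB (a b c d : String) :
    mergeInnerA a b c d = innerB a b c d := by
  simp only [mergeInnerA, innerB, PySem.List.foldl_ignore]
  split
  all_goals
    rw [charA_eq_mergedBaseB, PySem.List.foldl_append_singleton_eq_map, List.nil_append]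

-- the heart: A's two phases equal B's single pass, for any (already swapped) four reads
theorem core_eq (s1 s2 q1 q2 : List Char) (ins1 ins2 : Option (List (Int × String × String))) (qc md : Int) :
    ((PySem.List.pyRange (((phase1A s1 s2 q1 q2 qc md).length : Int) - 1) (-1) (-1)).foldl
       (fun m pos =>
         if (lookupInsA (ins1.getD []) pos).1 ≠ "" ∨ (lookupInsA (ins2.getD []) pos).1 ≠ "" then
           PySem.List.slice m none (some pos)
             ++ (mergeInnerA (lookupInsA (ins1.getD []) pos).1 (lookupInsA (ins2.getD []) pos).1
                   (lookupInsA (ins1.getD []) pos).2 (lookupInsA (ins2.getD []) pos).2).toList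
             ++ PySem.List.slice m (some pos) none
         else m) (phase1A s1 s2 q1 q2 qc md))
    = (List.range s2.length).foldl (fun pieces i =>
        (if (getInsB ins1 (Int.ofNat i)).1 ≠ "" ∨ (getInsB ins2 (Int.ofNat i)).1 ≠ "" then
           pieces ++ (innerB (getInsB ins1 (Int.ofNat i)).1 (getInsB ins2 (Int.ofNat i)).1
                        (getInsB ins1 (Int.ofNat i)).2 (getInsB ins2 (Int.ofNat i)).2).toList
         else pieces) ++ [mergedBaseB s1 s2 q1 q2 i qc md]) [] := by
  have hphi := charA_eq_mergedBaseB s1 s2 q1 q2 qc md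
  set h : Nat → Char := fun j => mergedBaseB s1 s2 q1 q2 j qc md with hh
  set g : Int → List Char := fun pos =>
    if (lookupInsA (ins1.getD []) pos).1 ≠ "" ∨ (lookupInsA (ins2.getD []) pos).1 ≠ "" then
      (mergeInnerA (lookupInsA (ins1.getD []) pos).1 (lookupInsA (ins2.getD []) pos).1
        (lookupInsA (ins1.getD []) pos).2 (lookupInsA (ins2.getD []) pos).2).toList
    else [] with hg
  rw [hphi]
  have hcong : ∀ (acc : List Char), ∀ pos ∈ PySem.List.pyRange
      ((((List.range s2.length).map h).length : Int) - 1) (-1) (-1),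
      (fun m pos =>
         if (lookupInsA (ins1.getD []) pos).1 ≠ "" ∨ (lookupInsA (ins2.getD []) pos).1 ≠ "" then
           PySem.List.slice m none (some pos)
             ++ (mergeInnerA (lookupInsA (ins1.getD []) pos).1 (lookupInsA (ins2.getD []) pos).1
                   (lookupInsA (ins1.getD []) pos).2 (lookupInsA (ins2.getD []) pos).2).toList
             ++ PySem.List.slice m (some pos) none
         else m) acc pos
      = acc.take pos.toNat ++ g pos ++ acc.drop pos.toNat := by
    intro acc pos hpos
    rw [PySem.List.mem_pyRange_neg_one] at hpos
    have h0 : (0:Int) ≤ pos := by omega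
    simp only [hg]
    split
    · rw [PySem.List.slice_to acc h0, PySem.List.slice_from acc h0]
    · rw [List.append_nil, List.take_append_drop]
  rw [PySem.List.foldl_congr_mem _ _ _ _ hcong]
  have := splice_desc g ((List.range s2.length).map h) []
  rw [List.append_nil] at this
  rw [this, List.append_nil]
  have hB : ∀ (pieces : List Char), ∀ i ∈ List.range s2.length,
      ((if (getInsB ins1 (Int.ofNat i)).1 ≠ "" ∨ (getInsB ins2 (Int.ofNat i)).1 ≠ "" then
           pieces ++ (innerB (getInsB ins1 (Int.ofNat i)).1 (getInsB ins2 (Int.ofNat i)).1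
                        (getInsB ins1 (Int.ofNat i)).2 (getInsB ins2 (Int.ofNat i)).2).toList
         else pieces) ++ [mergedBaseB s1 s2 q1 q2 i qc md])
      = pieces ++ ((if (getInsB ins1 (Int.ofNat i)).1 ≠ "" ∨ (getInsB ins2 (Int.ofNat i)).1 ≠ "" then
           (innerB (getInsB ins1 (Int.ofNat i)).1 (getInsB ins2 (Int.ofNat i)).1
              (getInsB ins1 (Int.ofNat i)).2 (getInsB ins2 (Int.ofNat i)).2).toList
         else []) ++ [h i]) := by
    intro pieces i _
    split <;> simp [List.append_assoc, hh]
  rw [PySem.List.foldl_congr_mem _ _ _ _ hB,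
      PySem.List.foldl_append_eq_flatMap, List.nil_append]
  simp only [List.length_map, List.length_range]
  rw [List.flatMap_def, List.flatMap_def]
  refine congrArg List.flatten (List.map_congr_left ?_)
  intro j hj
  rw [List.mem_range] at hj
  rw [PySem.List.getD_map_range h s2.length j ' ' hj]
  congr 1
  simp only [hg]
  rw [lookupInsA_eq_getInsB ins1, lookupInsA_eq_getInsB ins2]
  split
  · rw [mergeInnerA_eq_innerB]
  · rfl

theorem merge_pairs_eq' (seq1 seq2 qual1 qual2 : String) (ins1 ins2 : Option (List (Int × String × String))) (qc md : Int) :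
    merge_pairs seq1 seq2 qual1 qual2 ins1 ins2 qc md
      = merge_pairs_alt seq1 seq2 qual1 qual2 ins1 ins2 qc md := by
  simp only [merge_pairs, merge_pairs_alt]
  split
  · exact congrArg String.ofList (core_eq seq2.toList seq1.toList qual2.toList qual1.toList ins1 ins2 qc md)
  · exact congrArg String.ofList (core_eq seq1.toList seq2.toList qual1.toList qual2.toList ins1 ins2 qc md)

-- ===== VERDICT (by name: the statement is the Claim_ definition above) =====
theorem merge_pairs_spec : Claim_equal_merge_pairs := by
  intro seq1 seq2 qual1 qual2 ins1 ins2 qc md _ _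
  exact merge_pairs_eq' seq1 seq2 qual1 qual2 ins1 ins2 qc md
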